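-- pv_equiv track=rewrite | github.com/kunalbandooni/InterviewBit | Chain of Pairs.py | chainPairs
-- ===== SOURCE A (Python) =====
-- def chainPairs(A):
--     row = len(A)
--     col = len(A[0])
--     t = []
--     dp = [1]*row
--     for i in range(row):
--         for j in range(0,i):
--             if A[i][0]>A[j][1]:
--                 dp[i] = max(dp[i],dp[j]+1)
--     return max(dp)
-- ===== SOURCE B (Python) =====
-- import bisect
--
-- # Segment tree (functional, tuples) for prefix-max over compressed end-values:
-- # O(n log n) instead of A's O(n^2) nested loops.
--
-- def _build(n):
--     if n <= 1:
--         return (0,)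
--     h = n // 2
--     return (0, _build(n - h), _build(h))
--
-- def _query(t, n, k):
--     # max of leaves [0, k) of a tree covering n slots; 0 for an empty prefix
--     if k <= 0:
--         return 0
--     if n <= 1 or k >= n:
--         return t[0]
--     h = n // 2
--     if k <= n - h:
--         return _query(t[1], n - h, k)
--     return max(t[1][0], _query(t[2], h, k - (n - h)))
--
-- def _update(t, n, i, v):
--     # leaf i := max(leaf i, v), maxima recomputed on the path
--     if n <= 1:
--         return (max(t[0], v),)
--     h = n // 2
--     if i < n - h:
--         l, r = _update(t[1], n - h, i, v), t[2]
--     else: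
--         l, r = t[1], _update(t[2], h, i - (n - h), v)
--     return (max(l[0], r[0]), l, r)
--
-- def chainPairs(A):
--     ends = sorted(set(p[1] for p in A))
--     m = len(ends)
--     tree = _build(m)
--     best = 0
--     for p in A:
--         d = 1 + _query(tree, m, bisect.bisect_left(ends, p[0]))
--         if d > best:
--             best = d
--         tree = _update(tree, m, bisect.bisect_left(ends, p[1]), d)
--     return best
-- ===== Notes on version B (the rewrite author's own statement) =====
-- stated objective: faster
-- what changed: Replaces the O(n^2) nested-loop DP by a left-to-right scan with a prefix-maximum segment tree over the sorted distinct end-values (bisect for rank), so the inner scan over all earlier pairs disappears.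
-- outside the precondition, e.g. on chainPairs([[3]]): A returns 1, B raises IndexError; on chainPairs([[]]): A returns 1, B raises IndexError; on chainPairs([[1, 2], [4]]): A returns 2, B raises IndexError
import Mathlib
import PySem

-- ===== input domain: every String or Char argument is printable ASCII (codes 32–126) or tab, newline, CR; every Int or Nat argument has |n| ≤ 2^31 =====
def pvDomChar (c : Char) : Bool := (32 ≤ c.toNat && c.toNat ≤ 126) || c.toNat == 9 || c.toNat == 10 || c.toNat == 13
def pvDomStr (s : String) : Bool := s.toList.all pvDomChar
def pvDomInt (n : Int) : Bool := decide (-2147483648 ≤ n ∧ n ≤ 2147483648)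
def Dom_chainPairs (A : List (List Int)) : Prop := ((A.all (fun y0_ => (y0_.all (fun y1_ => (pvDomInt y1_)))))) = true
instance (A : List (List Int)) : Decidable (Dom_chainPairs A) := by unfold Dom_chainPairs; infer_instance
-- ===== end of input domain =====

-- B replaces A's O(n^2) nested-loop DP by a scan with a prefix-maximum segment tree
-- over the sorted distinct end-values (objective: faster, measured in a timing run).

-- ===== PORT A =====
def chainPairs (A : List (List Int)) : Int :=
  let row := PySem.List.len A
  let _col := PySem.List.len (PySem.List.pyGetD A 0 [])   -- len(A[0]); raises only outside Pre_
  let dp : List Int := PySem.List.pyRepeat [1] row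
  let dp := (PySem.List.pyRange 0 row 1).foldl (fun dp i =>
    (PySem.List.pyRange 0 i 1).foldl (fun dp j =>
      if PySem.List.pyGetD (PySem.List.pyGetD A i []) 0 0 >
         PySem.List.pyGetD (PySem.List.pyGetD A j []) 1 0 then
        PySem.List.pySetD dp i (max (PySem.List.pyGetD dp i 0) (PySem.List.pyGetD dp j 0 + 1))
      else dp) dp) dp
  (PySem.List.max? dp (fun y => y)).getD 0   -- max(dp); dp empty only outside Pre_

-- ===== PORT B =====
-- functional segment tree (the Python tuples (v,) / (v,l,r) from Source B)
inductive SegTree : Type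
  | leaf : Int → SegTree
  | node : Int → SegTree → SegTree → SegTree
deriving Repr, DecidableEq

def SegTree.top : SegTree → Int
  | .leaf v => v
  | .node v _ _ => v

def stBuild (n : Nat) : SegTree :=
  if h : n ≤ 1 then .leaf 0
  else .node 0 (stBuild (n - n / 2)) (stBuild (n / 2))
decreasing_by all_goals omega

def stQuery : SegTree → Nat → Nat → Int
  | .leaf v, _, k => if k = 0 then 0 else v
  | .node v l r, n, k =>
    if k = 0 then 0
    else if n ≤ 1 ∨ n ≤ k then v
    else if k ≤ n - n / 2 then stQuery l (n - n / 2) k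
    else max l.top (stQuery r (n / 2) (k - (n - n / 2)))

def stUpdate : SegTree → Nat → Nat → Int → SegTree
  | .leaf w, _, _, v => .leaf (max w v)
  | .node w l r, n, i, v =>
    if n ≤ 1 then .leaf (max w v)   -- Python's n<=1 branch; unreachable for trees built by stBuild n
    else if i < n - n / 2 then
      let l' := stUpdate l (n - n / 2) i v
      .node (max l'.top r.top) l' r
    else
      let r' := stUpdate r (n / 2) (i - (n - n / 2)) v
      .node (max l.top r'.top) l r'

def chainPairs_alt (A : List (List Int)) : Int :=
  let ends : List Int :=
    PySem.List.sorted (PySem.Set.ofList (A.map (fun p => PySem.List.pyGetD p 1 0))) (fun x => x)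
  let m := ends.length
  let res := A.foldl (fun (st : SegTree × Int) p =>
      let d := 1 + stQuery st.1 m (PySem.List.bisectLeft ends (PySem.List.pyGetD p 0 0))
      let best := if d > st.2 then d else st.2
      (stUpdate st.1 m (PySem.List.bisectLeft ends (PySem.List.pyGetD p 1 0)) d, best))
    (stBuild m, 0)
  res.2

-- ===== PRECONDITION & SPEC =====
-- Pre_ excludes the empty list (A raises IndexError on len(A[0])) and inputs containing a row
-- with fewer than two elements: on most of those A raises IndexError too, and on the rest
-- (only the LAST row short, e.g. [[3]] or [[1,2],[4]]) A returns but B's natural p[1] raises.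
def Pre_chainPairs (A : List (List Int)) : Prop :=
  A ≠ [] ∧ ∀ r ∈ A, 2 ≤ r.length
instance (A : List (List Int)) : Decidable (Pre_chainPairs A) := by
  unfold Pre_chainPairs; infer_instance

def pvWitness_chainPairs : List (List Int) := [[1, 2], [3, 4], [0, 5]]

def Spec_chainPairs (A : List (List Int)) (out : Int) : Prop := out = chainPairs_alt A
instance (A : List (List Int)) (out : Int) : Decidable (Spec_chainPairs A out) := by
  unfold Spec_chainPairs; infer_instance

-- ===== CLAIM (what is proved, stated in full; the proofs are below) =====
def Claim_equal_chainPairs : Prop :=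
  ∀ (A : List (List Int)), Dom_chainPairs A → Pre_chainPairs A → Spec_chainPairs A (chainPairs A)

-- ===== LEMMAS AND PROOFS =====

-- running maximum with base 0 (all chain lengths are ≥ 1, all defaults 0)
def M (l : List Int) : Int := l.foldl max 0

lemma M_nonneg (l : List Int) : 0 ≤ M l := (PySem.List.le_foldl_max l 0).1

lemma foldl_max_shift (l : List Int) : ∀ a b : Int, l.foldl max (max a b) = max a (l.foldl max b) := by
  induction l with
  | nil => intro a b; rfl
  | cons x t ih =>
    intro a b
    simp only [List.foldl_cons]
    rw [max_assoc, ih]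

lemma M_append (a b : List Int) : M (a ++ b) = max (M a) (M b) := by
  have hn : (0:Int) ≤ List.foldl max 0 a := M_nonneg a
  unfold M
  rw [List.foldl_append]
  calc List.foldl max (List.foldl max 0 a) b
      = List.foldl max (max (List.foldl max 0 a) 0) b := by rw [max_eq_left hn]
    _ = max (List.foldl max 0 a) (List.foldl max 0 b) := foldl_max_shift b _ 0

lemma M_cons (x : Int) (l : List Int) : M (x :: l) = max 0 (max x (M l)) := by
  have h1 : M (x :: l) = max (max 0 x) (M l) := by
    unfold M
    simp only [List.foldl_cons]
    calc List.foldl max (max 0 x) l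
        = List.foldl max (max (max 0 x) 0) l := by rw [max_right_comm, max_self]
      _ = max (max 0 x) (List.foldl max 0 l) := foldl_max_shift l _ 0
  have := M_nonneg l
  omega

lemma M_append_singleton (l : List Int) (x : Int) : M (l ++ [x]) = max (M l) x := by
  rw [M_append]
  have h1 := M_nonneg l
  have h2 : M [x] = max 0 x := rfl
  omega

lemma M_replicate_zero (k : Nat) : M (List.replicate k 0) = 0 := by
  induction k with
  | zero => rfl
  | succ n ih => rw [List.replicate_succ, M_cons, ih]; omega

lemma M_set_max (l : List Int) (i : Nat) (h : i < l.length) (d : Int) :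
    M (l.set i (max (l.getD i 0) d)) = max (M l) d := by
  have key : ∀ (a b : List Int) (v : Int), M (a ++ max v d :: b) = max (M (a ++ v :: b)) d := by
    intro a b v
    rw [M_append, M_cons, M_append, M_cons]
    have := M_nonneg a; have := M_nonneg b; omega
  have hdecomp : l.take i ++ l[i] :: l.drop (i + 1) = l := by
    rw [← List.set_eq_take_cons_drop _ h, List.set_getElem_self]
  calc M (l.set i (max (l.getD i 0) d))
      = M (l.take i ++ max l[i] d :: l.drop (i + 1)) := by
        rw [List.getD_eq_getElem l 0 h, List.set_eq_take_cons_drop _ h]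
    _ = max (M (l.take i ++ l[i] :: l.drop (i + 1))) d := key _ _ _
    _ = max (M l) d := by rw [hdecomp]

lemma foldl_max_snd (l : List (Int × Int)) : ∀ a : Int,
    l.foldl (fun acc q => max acc (q.2 + 1)) (1 + a) = 1 + (l.map (·.2)).foldl max a := by
  induction l with
  | nil => intro a; rfl
  | cons q t ih =>
    intro a
    simp only [List.foldl_cons, List.map_cons]
    rw [show max (1 + a) (q.2 + 1) = 1 + max a q.2 from by omega, ih]

-- the reference recurrence: seen = list of (end value, chain length) already processed
def gstep (seen : List (Int × Int)) (p : Int × Int) : List (Int × Int) :=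
  seen ++ [(p.2, 1 + M ((seen.filter (fun q => q.1 < p.1)).map (·.2)))]

def growSeen (seen : List (Int × Int)) (ps : List (Int × Int)) : List (Int × Int) :=
  ps.foldl gstep seen

def specFrom : List (Int × Int) → List (Int × Int) → Int → Int
  | [], _, best => best
  | p :: ps, seen, best =>
    let d := 1 + M ((seen.filter (fun q => q.1 < p.1)).map (·.2))
    specFrom ps (seen ++ [(p.2, d)]) (max best d)

lemma growSeen_suffix (ps : List (Int × Int)) : ∀ seen, ∃ rest, growSeen seen ps = seen ++ rest := by
  induction ps with
  | nil => intro seen; exact ⟨[], by simp [growSeen]⟩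
  | cons p t ih =>
    intro seen
    obtain ⟨r, hr⟩ := ih (gstep seen p)
    exact ⟨[(p.2, 1 + M ((seen.filter (fun q => q.1 < p.1)).map (·.2)))] ++ r,
      by simpa [growSeen, gstep, List.append_assoc] using hr⟩

lemma specFrom_eq (ps : List (Int × Int)) : ∀ seen best,
    specFrom ps seen best = (((growSeen seen ps).drop seen.length).map (·.2)).foldl max best := by
  induction ps with
  | nil => intro seen best; simp [specFrom, growSeen]
  | cons p t ih =>
    intro seen best
    set d := 1 + M ((seen.filter (fun q => q.1 < p.1)).map (·.2)) with hd
    obtain ⟨rest, hrest⟩ := growSeen_suffix t (seen ++ [(p.2, d)])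
    have hstep : growSeen seen (p :: t) = growSeen (seen ++ [(p.2, d)]) t := rfl
    simp only [specFrom]
    rw [ih, hstep, hrest, List.drop_left]
    rw [List.append_assoc, List.drop_left]
    simp only [List.singleton_append, List.map_cons, List.foldl_cons]
    rfl
  
def pairsOf (A : List (List Int)) : List (Int × Int) :=
  A.map (fun r => (PySem.List.pyGetD r 0 0, PySem.List.pyGetD r 1 0))

lemma growSeen_length (ps : List (Int × Int)) : ∀ seen, (growSeen seen ps).length = seen.length + ps.length := by
  induction ps with
  | nil => intro seen; simp [growSeen]
  | cons p t ih =>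
    intro seen
    show (growSeen (gstep seen p) t).length = _
    rw [ih]
    simp [gstep]
    omega

lemma growSeen_fst (ps : List (Int × Int)) : ∀ seen,
    (growSeen seen ps).map (·.1) = seen.map (·.1) ++ ps.map (·.2) := by
  induction ps with
  | nil => intro seen; simp [growSeen]
  | cons p t ih =>
    intro seen
    have := ih (gstep seen p)
    simp only [growSeen, List.foldl_cons] at this ⊢
    rw [this]
    simp [gstep]

lemma growSeen_pos (ps : List (Int × Int)) : ∀ seen, (∀ q ∈ seen, 0 ≤ q.2) →
    ∀ q ∈ growSeen seen ps, 0 ≤ q.2 := by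
  induction ps with
  | nil => intro seen h; simpa [growSeen] using h
  | cons p t ih =>
    intro seen h
    simp only [growSeen, List.foldl_cons]
    refine ih (gstep seen p) ?_
    intro q hq
    rcases List.mem_append.mp hq with hql | hqr
    · exact h q hql
    · have hM := M_nonneg ((seen.filter (fun q => q.1 < p.1)).map (·.2))
      simp only [List.mem_singleton] at hqr
      subst hqr
      simpa using by omega

lemma growSeen_append_singleton (seen : List (Int × Int)) (ps : List (Int × Int)) (p : Int × Int) :
    growSeen seen (ps ++ [p]) = gstep (growSeen seen ps) p := by
  simp [growSeen, List.foldl_append]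

-- generic: a fold over range indexing into a list is a fold over the list
lemma foldl_range_take {α β : Type} (f : β → α → β) (d : α) (L : List α) :
    ∀ k, k ≤ L.length → ∀ init,
      (List.range k).foldl (fun acc j => f acc (L.getD j d)) init = (L.take k).foldl f init := by
  intro k
  induction k with
  | zero => intro _ init; simp
  | succ k ih =>
    intro hk init
    have hk' : k < L.length := by omega
    rw [List.range_succ, List.foldl_append, ih (by omega), List.take_add_one,
      List.getElem?_eq_getElem hk']
    simp only [Option.toList_some, List.foldl_append, List.foldl_cons, List.foldl_nil]
    rw [List.getD_eq_getElem _ _ hk']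

-- collapse the inner loop: repeated assignment to slot i is one assignment of a fold
lemma foldl_set_collapse (P : Nat → Prop) [DecidablePred P] (i : Nat) :
    ∀ (L : List Nat), (∀ j ∈ L, j ≠ i) → ∀ (dp : List Int), i < dp.length →
      L.foldl (fun dp j => if P j then dp.set i (max (dp.getD i 0) (dp.getD j 0 + 1)) else dp) dp
        = dp.set i (L.foldl (fun a j => if P j then max a (dp.getD j 0 + 1) else a) (dp.getD i 0)) := by
  intro L
  induction L with
  | nil =>
    intro _ dp h
    simp only [List.foldl_nil]
    rw [List.getD_eq_getElem _ _ h, List.set_getElem_self]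
  | cons x t ih =>
    intro hne dp h
    have hxi : x ≠ i := hne x (by simp)
    simp only [List.foldl_cons]
    by_cases hP : P x
    · rw [if_pos hP, if_pos hP]
      set v := max (dp.getD i 0) (dp.getD x 0 + 1) with hv
      have hlen : i < (dp.set i v).length := by simpa using h
      rw [ih (fun j hj => hne j (by simp [hj])) _ hlen]
      have hgi : (dp.set i v).getD i 0 = v := by
        rw [List.getD_eq_getElem _ _ hlen, List.getElem_set_self]
      rw [hgi, List.set_set]
      congr 1
      refine PySem.List.foldl_congr_mem' t _ _ v ?_
      intro j hj a
      have hji : j ≠ i := hne j (by simp [hj])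
      have : (dp.set i v).getD j 0 = dp.getD j 0 := by
        rw [List.getD_eq_getElem?_getD, List.getD_eq_getElem?_getD, List.getElem?_set_ne (by omega)]
      rw [this]
    · rw [if_neg hP, if_neg hP]
      exact ih (fun j hj => hne j (by simp [hj])) dp h

def innerPure (A : List (List Int)) (i : Nat) (dp : List Int) : List Int :=
  List.foldl
    (fun dp j =>
      if PySem.List.pyGetD (A.getD i []) 0 0 > PySem.List.pyGetD (A.getD j []) 1 0 then
        dp.set i (max (dp.getD i 0) (dp.getD j 0 + 1))
      else dp)
    dp (List.range i)

def dpAll (A : List (List Int)) : List Int :=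
  List.foldl (fun dp i => innerPure A i dp) (List.replicate A.length 1) (List.range A.length)

lemma A_pure (A : List (List Int)) :
    chainPairs A = (PySem.List.max? (dpAll A) (fun y => y)).getD 0 := by
  simp only [chainPairs, PySem.List.len_eq, PySem.List.pyRepeat_singleton, Int.toNat_natCast,
    PySem.List.pyRange_zero_natCast, List.foldl_map, PySem.List.pyGetD_natCast,
    PySem.List.pySetD_natCast]
  rfl

lemma outer_inv (A : List (List Int)) : ∀ k, k ≤ A.length →
    List.foldl (fun dp i => innerPure A i dp) (List.replicate A.length 1) (List.range k)
      = (growSeen [] ((pairsOf A).take k)).map (·.2) ++ List.replicate (A.length - k) 1 := by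
  intro k
  induction k with
  | zero => simp [growSeen]
  | succ k ih =>
    intro hk1
    have hk : k < A.length := by omega
    have hps : (pairsOf A).length = A.length := by simp [pairsOf]
    rw [List.range_succ, List.foldl_append, ih (by omega)]
    simp only [List.foldl_cons, List.foldl_nil]
    set S := growSeen [] ((pairsOf A).take k) with hS
    have hSlen : S.length = k := by
      rw [hS, growSeen_length]
      simp
      omega
    set G := S.map (·.2) with hG
    have hGlen : G.length = k := by rw [hG, List.length_map, hSlen]
    set rest := List.replicate (A.length - k) (1 : Int) with hrest
    have hdplen : k < (G ++ rest).length := by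
      simp only [List.length_append, hGlen, hrest, List.length_replicate]
      omega
    rw [innerPure, foldl_set_collapse
      (fun j => PySem.List.pyGetD (A.getD k []) 0 0 > PySem.List.pyGetD (A.getD j []) 1 0) k
      (List.range k) (fun j hj => by simp at hj; omega) _ hdplen]
    have ha0 : (G ++ rest).getD k 0 = 1 := by
      rw [List.getD_eq_getElem?_getD, List.getElem?_append_right (by omega), hGlen, Nat.sub_self,
        hrest, List.getElem?_replicate, if_pos (by omega)]
      rfl
    have hfold :
        List.foldl (fun a j =>
            if PySem.List.pyGetD (A.getD k []) 0 0 > PySem.List.pyGetD (A.getD j []) 1 0 then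
              max a ((G ++ rest).getD j 0 + 1)
            else a) ((G ++ rest).getD k 0) (List.range k)
          = 1 + M ((S.filter (fun q => decide (q.1 < PySem.List.pyGetD (A.getD k []) 0 0))).map (·.2)) := by
      rw [ha0]
      have hcong : ∀ j ∈ List.range k, ∀ (a : Int),
          (if PySem.List.pyGetD (A.getD k []) 0 0 > PySem.List.pyGetD (A.getD j []) 1 0 then
            max a ((G ++ rest).getD j 0 + 1) else a)
            = (fun (a : Int) (q : Int × Int) =>
                if q.1 < PySem.List.pyGetD (A.getD k []) 0 0 then max a (q.2 + 1) else a) a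
                (S.getD j (0, 1)) := by
        intro j hj a
        have hjk : j < k := List.mem_range.mp hj
        have hjS : j < S.length := by omega
        have hjA : j < A.length := by omega
        have h1 : S.getD j (0, 1) = S[j] := List.getD_eq_getElem _ _ hjS
        have hfst : S[j].1 = PySem.List.pyGetD (A.getD j []) 1 0 := by
          have hmf := growSeen_fst ((pairsOf A).take k) []
          simp only [List.map_nil, List.nil_append] at hmf
          have h2 := congrArg (fun l => l[j]?) hmf
          simp only [List.getElem?_map] at h2
          rw [List.getElem?_eq_getElem hjS, List.getElem?_take_of_lt hjk,
            List.getElem?_eq_getElem (by omega : j < (pairsOf A).length)] at h2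
          simp only [Option.map_some, Option.some.injEq] at h2
          rw [h2]
          simp [pairsOf, List.getElem?_eq_getElem hjA]
        have hsnd : (G ++ rest).getD j 0 = S[j].2 := by
          rw [List.getD_eq_getElem?_getD, List.getElem?_append_left (by omega), hG,
            List.getElem?_map, List.getElem?_eq_getElem hjS]
          rfl
        rw [h1]
        simp only [hsnd, hfst, gt_iff_lt]
      rw [PySem.List.foldl_congr_mem' (List.range k) _ _ 1 hcong,
        foldl_range_take
          (fun (a : Int) (q : Int × Int) =>
            if q.1 < PySem.List.pyGetD (A.getD k []) 0 0 then max a (q.2 + 1) else a)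
          (0, 1) S k (le_of_eq hSlen.symm) 1,
        List.take_of_length_le (le_of_eq hSlen),
        PySem.List.foldl_ite_eq_foldl_filter
          (fun (q : Int × Int) => q.1 < PySem.List.pyGetD (A.getD k []) 0 0)
          (fun (a : Int) (q : Int × Int) => max a (q.2 + 1)) S 1]
      have hfin := foldl_max_snd
        (S.filter (fun q => decide (q.1 < PySem.List.pyGetD (A.getD k []) 0 0))) 0
      rw [show (1 : Int) + 0 = 1 from rfl] at hfin
      rw [hfin]
      rfl
    rw [hfold]
    have htake : (pairsOf A).take (k + 1)
        = (pairsOf A).take k ++ [(pairsOf A)[k]'(by omega)] := by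
      rw [List.take_add_one, List.getElem?_eq_getElem (by omega : k < (pairsOf A).length)]
      rfl
    rw [htake, growSeen_append_singleton]
    have hpk1 : ((pairsOf A)[k]'(by omega : k < (pairsOf A).length)).1
        = PySem.List.pyGetD (A.getD k []) 0 0 := by
      simp [pairsOf, List.getElem?_eq_getElem hk]
    simp only [gstep, List.map_append, List.map_cons, List.map_nil, hpk1, ← hS, ← hG]
    rw [List.set_append_right _ _ (by omega), hGlen, Nat.sub_self, hrest,
      show A.length - k = (A.length - (k + 1)) + 1 from by omega, List.replicate_succ,
      List.set_cons_zero]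
    simp

lemma dpAll_eq (A : List (List Int)) :
    dpAll A = (growSeen [] (pairsOf A)).map (·.2) := by
  have h := outer_inv A A.length le_rfl
  have hlen : (pairsOf A).length = A.length := by simp [pairsOf]
  rw [dpAll, h, Nat.sub_self, List.take_of_length_le (by omega)]
  simp

theorem A_eq_spec (A : List (List Int)) :
    chainPairs A = specFrom (pairsOf A) [] 0 := by
  rw [A_pure, dpAll_eq, specFrom_eq]
  simp only [List.length_nil, List.drop_zero]
  set D := (growSeen [] (pairsOf A)).map (·.2) with hD
  cases hcase : D with
  | nil => simp [PySem.List.max?]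
  | cons x t =>
    rw [PySem.List.max?_id_cons]
    have hx : 0 ≤ x := by
      have hmem : x ∈ D := by rw [hcase]; simp
      rw [hD] at hmem
      obtain ⟨q, hq, hq2⟩ := List.mem_map.mp hmem
      have := growSeen_pos (pairsOf A) [] (by simp) q hq
      omega
    simp only [Option.getD_some, List.foldl_cons]
    rw [max_eq_right hx]

-- ===== B-side: segment-tree characterisation =====
def SegTree.vals : SegTree → List Int
  | .leaf v => [v]
  | .node _ l r => l.vals ++ r.vals

def Shaped : SegTree → Nat → Prop
  | .leaf _, n => n ≤ 1
  | .node _ l r, n => 2 ≤ n ∧ Shaped l (n - n / 2) ∧ Shaped r (n / 2)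

def GoodT : SegTree → Prop
  | .leaf v => 0 ≤ v
  | .node v l r => v = max l.top r.top ∧ GoodT l ∧ GoodT r

lemma top_eq (t : SegTree) (h : GoodT t) : t.top = M t.vals := by
  induction t with
  | leaf v =>
    simp only [GoodT] at h
    show v = M [v]
    show v = max 0 v
    omega
  | node v l r ihl ihr =>
    obtain ⟨hv, hl, hr⟩ := h
    show v = M (l.vals ++ r.vals)
    rw [M_append, hv, ihl hl, ihr hr]

lemma shaped_vals_length (t : SegTree) : ∀ n, Shaped t n → t.vals.length = max n 1 := by
  induction t with
  | leaf v =>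
    intro n h
    simp only [Shaped] at h
    simp only [SegTree.vals, List.length_cons, List.length_nil]
    omega
  | node v l r ihl ihr =>
    intro n h
    obtain ⟨h2, hl, hr⟩ := h
    simp only [SegTree.vals, List.length_append, ihl _ hl, ihr _ hr]
    omega

lemma stBuild_good : ∀ n, Shaped (stBuild n) n ∧ GoodT (stBuild n) ∧
    (stBuild n).vals = List.replicate (max n 1) 0 := by
  intro n
  induction n using Nat.strong_induction_on with
  | _ n ih =>
    rw [stBuild]
    by_cases h : n ≤ 1
    · rw [dif_pos h]
      refine ⟨h, le_refl 0, ?_⟩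
      rw [show max n 1 = 1 from by omega]
      rfl
    · rw [dif_neg h]
      obtain ⟨s1, g1, v1⟩ := ih (n - n / 2) (by omega)
      obtain ⟨s2, g2, v2⟩ := ih (n / 2) (by omega)
      refine ⟨⟨by omega, s1, s2⟩, ⟨?_, g1, g2⟩, ?_⟩
      · rw [top_eq _ g1, top_eq _ g2, v1, v2, M_replicate_zero, M_replicate_zero]
        rfl
      · show (stBuild (n - n / 2)).vals ++ (stBuild (n / 2)).vals = _
        rw [v1, v2, show max n 1 = max (n - n / 2) 1 + max (n / 2) 1 from by omega,
          List.replicate_add]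

lemma getD_append_left' {a b : List Int} {j : Nat} (h : j < a.length) :
    (a ++ b).getD j 0 = a.getD j 0 := by
  rw [List.getD_eq_getElem?_getD, List.getD_eq_getElem?_getD, List.getElem?_append_left h]

lemma getD_append_right' {a b : List Int} {j : Nat} (h : a.length ≤ j) :
    (a ++ b).getD j 0 = b.getD (j - a.length) 0 := by
  rw [List.getD_eq_getElem?_getD, List.getD_eq_getElem?_getD, List.getElem?_append_right h]

lemma stUpdate_props : ∀ (t : SegTree) (n : Nat), Shaped t n → GoodT t →
    ∀ (i : Nat) (v : Int), i < n →
      Shaped (stUpdate t n i v) n ∧ GoodT (stUpdate t n i v) ∧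
        (stUpdate t n i v).vals = t.vals.set i (max (t.vals.getD i 0) v) := by
  intro t
  induction t with
  | leaf w =>
    intro n hs hg i v hi
    simp only [Shaped] at hs
    simp only [GoodT] at hg
    have hi0 : i = 0 := by omega
    subst hi0
    refine ⟨by simp [stUpdate, Shaped]; omega, by simp [stUpdate, GoodT]; omega, ?_⟩
    simp [stUpdate, SegTree.vals]
  | node w l r ihl ihr =>
    intro n hs hg i v hi
    obtain ⟨h2, hsl, hsr⟩ := hs
    obtain ⟨hw, hgl, hgr⟩ := hg
    have hlen_l : l.vals.length = n - n / 2 := by rw [shaped_vals_length l _ hsl]; omega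
    have hlen_r : r.vals.length = n / 2 := by rw [shaped_vals_length r _ hsr]; omega
    simp only [stUpdate]
    rw [if_neg (by omega)]
    by_cases hbranch : i < n - n / 2
    · rw [if_pos hbranch]
      obtain ⟨s', g', v'⟩ := ihl (n - n / 2) hsl hgl i v hbranch
      refine ⟨⟨h2, s', hsr⟩, ⟨rfl, g', hgr⟩, ?_⟩
      show (stUpdate l (n - n / 2) i v).vals ++ r.vals = _
      show _ = (l.vals ++ r.vals).set i (max ((l.vals ++ r.vals).getD i 0) v)
      rw [v', List.set_append_left _ _ (by omega), getD_append_left' (by omega)]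
    · rw [if_neg hbranch]
      obtain ⟨s', g', v'⟩ := ihr (n / 2) hsr hgr (i - (n - n / 2)) v (by omega)
      refine ⟨⟨h2, hsl, s'⟩, ⟨rfl, hgl, g'⟩, ?_⟩
      show l.vals ++ (stUpdate r (n / 2) (i - (n - n / 2)) v).vals = _
      show _ = (l.vals ++ r.vals).set i (max ((l.vals ++ r.vals).getD i 0) v)
      rw [v', List.set_append_right _ _ (by omega), getD_append_right' (by omega), hlen_l]

lemma stQuery_eq : ∀ (t : SegTree) (n : Nat), Shaped t n → GoodT t → 1 ≤ n →
    ∀ k, k ≤ n → stQuery t n k = M (t.vals.take k) := by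
  intro t
  induction t with
  | leaf v =>
    intro n hs hg h1 k hk
    simp only [Shaped] at hs
    simp only [GoodT] at hg
    have hn : n = 1 := by omega
    subst hn
    interval_cases k
    · rfl
    · show v = M [v]
      show v = max 0 v
      omega
  | node v l r ihl ihr =>
    intro n hs hg h1 k hk
    obtain ⟨h2, hsl, hsr⟩ := hs
    obtain ⟨hv, hgl, hgr⟩ := hg
    have hlen_l : l.vals.length = n - n / 2 := by rw [shaped_vals_length l _ hsl]; omega
    have hlen_r : r.vals.length = n / 2 := by rw [shaped_vals_length r _ hsr]; omega
    simp only [stQuery]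
    by_cases hk0 : k = 0
    · subst hk0
      rw [if_pos rfl]
      rfl
    · rw [if_neg hk0]
      by_cases hfull : n ≤ 1 ∨ n ≤ k
      · rw [if_pos hfull]
        have hkn : k = n := by omega
        show v = M ((l.vals ++ r.vals).take k)
        rw [hkn, List.take_of_length_le (by rw [List.length_append]; omega),
          hv, top_eq l hgl, top_eq r hgr, M_append]
      · rw [if_neg hfull]
        push_neg at hfull
        by_cases hleft : k ≤ n - n / 2
        · rw [if_pos hleft, ihl (n - n / 2) hsl hgl (by omega) k hleft]
          show M (l.vals.take k) = M ((l.vals ++ r.vals).take k)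
          rw [List.take_append_of_le_length (by omega)]
        · rw [if_neg hleft]
          rw [ihr (n / 2) hsr hgr (by omega) (k - (n - n / 2)) (by omega), top_eq l hgl]
          show _ = M ((l.vals ++ r.vals).take k)
          have htk : (l.vals ++ r.vals).take k = l.vals ++ r.vals.take (k - (n - n / 2)) := by
            rw [List.take_append, List.take_of_length_le (by omega), hlen_l]
          rw [htk, M_append]

-- the table a scan builds: slot j holds the best chain length among ends of rank j
def tblOf (E : List Int) (seen : List (Int × Int)) : List Int :=
  seen.foldl (fun tbl q =>
    tbl.set (PySem.List.bisectLeft E q.1)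
      (max (tbl.getD (PySem.List.bisectLeft E q.1) 0) q.2))
    (List.replicate E.length 0)

lemma tblOf_append (E : List Int) (xs : List (Int × Int)) (q : Int × Int) :
    tblOf E (xs ++ [q]) = (tblOf E xs).set (PySem.List.bisectLeft E q.1)
      (max ((tblOf E xs).getD (PySem.List.bisectLeft E q.1) 0) q.2) := by
  simp [tblOf, List.foldl_append]

lemma tblOf_length (E : List Int) (seen : List (Int × Int)) :
    (tblOf E seen).length = E.length := by
  have aux : ∀ (ss : List (Int × Int)) (tbl : List Int),
      (ss.foldl (fun tbl q =>
        tbl.set (PySem.List.bisectLeft E q.1)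
          (max (tbl.getD (PySem.List.bisectLeft E q.1) 0) q.2)) tbl).length = tbl.length := by
    intro ss
    induction ss with
    | nil => intro tbl; rfl
    | cons q t ih =>
      intro tbl
      simp only [List.foldl_cons]
      rw [ih]
      simp
  simpa [tblOf] using aux seen (List.replicate E.length 0)

lemma rank_mem (E : List Int) (hlt : E.Pairwise (· < ·)) (x : Int) (hx : x ∈ E) :
    ∃ h : PySem.List.bisectLeft E x < E.length, E[PySem.List.bisectLeft E x]'h = x := by
  obtain ⟨idx, hidx, hval⟩ := List.mem_iff_getElem.mp hx
  have hspec := PySem.List.bisectLeft_spec E x (hlt.imp fun h => le_of_lt h)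
  have hbi : PySem.List.bisectLeft E x ≤ idx := by
    by_contra hc
    push_neg at hc
    have h3 := hspec.2.1 idx hidx hc
    rw [hval] at h3
    omega
  have hblen : PySem.List.bisectLeft E x < E.length := by omega
  refine ⟨hblen, ?_⟩
  have h1 : x ≤ E[PySem.List.bisectLeft E x] := hspec.2.2 _ hblen le_rfl
  have h2 : E[PySem.List.bisectLeft E x] ≤ E[idx] := by
    rcases Nat.eq_or_lt_of_le hbi with heq | hlt2
    · simp [heq]
    · exact le_of_lt (List.pairwise_iff_getElem.mp hlt _ idx hblen hidx hlt2)
  rw [hval] at h2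
  omega

lemma rank_lt_iff (E : List Int) (hlt : E.Pairwise (· < ·)) (e s : Int) (he : e ∈ E) :
    e < s ↔ PySem.List.bisectLeft E e < PySem.List.bisectLeft E s := by
  obtain ⟨hre, hEre⟩ := rank_mem E hlt e he
  have hspecs := PySem.List.bisectLeft_spec E s (hlt.imp fun h => le_of_lt h)
  constructor
  · intro hes
    by_contra hc
    push_neg at hc
    have h3 := hspecs.2.2 _ hre hc
    rw [hEre] at h3
    omega
  · intro hlt2
    have h3 := hspecs.2.1 _ hre hlt2
    rw [hEre] at h3
    exact h3

lemma M_take_tblOf (E : List Int) (hlt : E.Pairwise (· < ·)) :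
    ∀ (seen : List (Int × Int)), (∀ q ∈ seen, q.1 ∈ E) → ∀ k, k ≤ E.length →
      M ((tblOf E seen).take k)
        = M ((seen.filter (fun q => decide (PySem.List.bisectLeft E q.1 < k))).map (·.2)) := by
  intro seen
  induction seen using List.reverseRecOn with
  | nil =>
    intro _ k _
    simp only [tblOf, List.foldl_nil, List.take_replicate, List.filter_nil, List.map_nil]
    rw [M_replicate_zero]
    rfl
  | append_singleton xs q ih =>
    intro hmem k hk
    have hq1 : q.1 ∈ E := hmem q (by simp)
    obtain ⟨hrq, _⟩ := rank_mem E hlt q.1 hq1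
    have htbl : (tblOf E xs).length = E.length := tblOf_length E xs
    have hmem' : ∀ p ∈ xs, p.1 ∈ E := fun p hp => hmem p (by simp [hp])
    rw [tblOf_append, List.filter_append]
    by_cases hcase : PySem.List.bisectLeft E q.1 < k
    · rw [List.take_set]
      have hklen : ((tblOf E xs).take k).length = k := by
        rw [List.length_take]
        omega
      have hgetD : ((tblOf E xs).take k).getD (PySem.List.bisectLeft E q.1) 0
          = (tblOf E xs).getD (PySem.List.bisectLeft E q.1) 0 := by
        rw [List.getD_eq_getElem?_getD, List.getD_eq_getElem?_getD,
          List.getElem?_take_of_lt hcase]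
      rw [← hgetD, M_set_max _ _ (by omega) q.2, ih hmem' k hk]
      simp only [hcase, decide_true, List.filter_singleton, cond_true, List.map_append,
        List.map_cons, List.map_nil]
      rw [M_append_singleton]
    · rw [List.take_set_of_le (by omega : k ≤ PySem.List.bisectLeft E q.1), ih hmem' k hk]
      simp [hcase]

lemma B_loop (E : List Int) (hlt : E.Pairwise (· < ·)) (hm : 1 ≤ E.length) :
    ∀ (rows : List (List Int)) (seen : List (Int × Int)) (tree : SegTree) (best : Int),
      (∀ r ∈ rows, PySem.List.pyGetD r 1 0 ∈ E) →
      (∀ q ∈ seen, q.1 ∈ E) →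
      Shaped tree E.length → GoodT tree → tree.vals = tblOf E seen →
      (rows.foldl (fun (st : SegTree × Int) p =>
          let d := 1 + stQuery st.1 E.length (PySem.List.bisectLeft E (PySem.List.pyGetD p 0 0))
          let best := if d > st.2 then d else st.2
          (stUpdate st.1 E.length (PySem.List.bisectLeft E (PySem.List.pyGetD p 1 0)) d, best))
        (tree, best)).2
        = specFrom (pairsOf rows) seen best := by
  intro rows
  induction rows with
  | nil => intro seen tree best _ _ _ _ _; rfl
  | cons row rt ih =>
    intro seen tree best hrows hseen hsh hgd hvals
    simp only [List.foldl_cons, pairsOf, List.map_cons]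
    have he : PySem.List.pyGetD row 1 0 ∈ E := hrows row (by simp)
    obtain ⟨hre, _⟩ := rank_mem E hlt _ he
    have hkle : PySem.List.bisectLeft E (PySem.List.pyGetD row 0 0) ≤ E.length :=
      (PySem.List.bisectLeft_spec E _ (hlt.imp fun h => le_of_lt h)).1
    have hq : stQuery tree E.length (PySem.List.bisectLeft E (PySem.List.pyGetD row 0 0))
        = M ((seen.filter (fun q => decide (q.1 < PySem.List.pyGetD row 0 0))).map (·.2)) := by
      rw [stQuery_eq tree E.length hsh hgd hm _ hkle, hvals,
        M_take_tblOf E hlt seen hseen _ hkle]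
      congr 2
      apply List.filter_congr
      intro q hqm
      exact decide_eq_decide.mpr (rank_lt_iff E hlt q.1 _ (hseen q hqm)).symm
    obtain ⟨hsh', hgd', hvals'⟩ := stUpdate_props tree E.length hsh hgd
      (PySem.List.bisectLeft E (PySem.List.pyGetD row 1 0))
      (1 + stQuery tree E.length (PySem.List.bisectLeft E (PySem.List.pyGetD row 0 0))) hre
    rw [ih (seen ++ [(PySem.List.pyGetD row 1 0,
          1 + stQuery tree E.length (PySem.List.bisectLeft E (PySem.List.pyGetD row 0 0)))])
        (stUpdate tree E.length (PySem.List.bisectLeft E (PySem.List.pyGetD row 1 0))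
          (1 + stQuery tree E.length (PySem.List.bisectLeft E (PySem.List.pyGetD row 0 0))))
        (if 1 + stQuery tree E.length (PySem.List.bisectLeft E (PySem.List.pyGetD row 0 0)) > best
          then 1 + stQuery tree E.length (PySem.List.bisectLeft E (PySem.List.pyGetD row 0 0))
          else best)
        (fun r hr => hrows r (by simp [hr]))
        (fun q hqm => by
          rcases List.mem_append.mp hqm with h | h
          · exact hseen q h
          · rw [List.mem_singleton] at h
            rw [h]
            exact he)
        hsh' hgd' (by rw [hvals', hvals, tblOf_append])]
    simp only [specFrom, pairsOf]
    rw [hq]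
    congr 1
    omega

theorem B_eq_spec (A : List (List Int)) :
    chainPairs_alt A = specFrom (pairsOf A) [] 0 := by
  by_cases hA : A = []
  · subst hA; rfl
  · have hlt : (PySem.List.sorted
        (PySem.Set.ofList (A.map (fun p => PySem.List.pyGetD p 1 0))) (fun x => x)).Pairwise (· < ·) :=
      PySem.List.sorted_ofList_pairwise_lt _
    have hmemE : ∀ r ∈ A, PySem.List.pyGetD r 1 0 ∈ PySem.List.sorted
        (PySem.Set.ofList (A.map (fun p => PySem.List.pyGetD p 1 0))) (fun x => x) := by
      intro r hr
      rw [PySem.List.mem_sorted]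
      exact (PySem.Set.mem_ofList _ _).mpr (List.mem_map_of_mem hr)
    have hm : 1 ≤ (PySem.List.sorted
        (PySem.Set.ofList (A.map (fun p => PySem.List.pyGetD p 1 0))) (fun x => x)).length := by
      obtain ⟨r, hr⟩ := List.exists_mem_of_ne_nil A hA
      exact List.length_pos_of_mem (hmemE r hr)
    obtain ⟨hsh, hgd, hvals⟩ := stBuild_good (PySem.List.sorted
        (PySem.Set.ofList (A.map (fun p => PySem.List.pyGetD p 1 0))) (fun x => x)).length
    have hvals' : (stBuild (PySem.List.sorted
        (PySem.Set.ofList (A.map (fun p => PySem.List.pyGetD p 1 0))) (fun x => x)).length).vals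
        = tblOf (PySem.List.sorted
            (PySem.Set.ofList (A.map (fun p => PySem.List.pyGetD p 1 0))) (fun x => x)) [] := by
      rw [hvals, tblOf]
      rw [show max (PySem.List.sorted
        (PySem.Set.ofList (A.map (fun p => PySem.List.pyGetD p 1 0))) (fun x => x)).length 1
          = (PySem.List.sorted
        (PySem.Set.ofList (A.map (fun p => PySem.List.pyGetD p 1 0))) (fun x => x)).length
        from by omega]
      rfl
    exact B_loop _ hlt hm A [] (stBuild _) 0 hmemE (by simp) hsh hgd hvals'
-- ===== VERDICT (by name: the statement is the Claim_ definition above) =====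
theorem chainPairs_spec : Claim_equal_chainPairs := by
  intro A _ _
  unfold Spec_chainPairs
  rw [A_eq_spec, B_eq_spec]
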